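-- pv_equiv track=rewrite | github.com/sarahmarie23/Python | Lab08.py | more_vowels
-- ===== SOURCE A (Python) =====
-- from collections import Counter
--
-- def more_vowels(string1, string2):
--
--     vowels = "AEIOUaeiou"
--
--     count1 = Counter(string1)
--     count2 = Counter(string2)
--
--     sum1 = 0
--     sum2 = 0
--
--     for char in count1:
--         if char in vowels:
--             sum1 += count1[char]
--
--
--     for char in count2:
--         if char in vowels:
--             sum2 += count2[char]
--
--
--     if sum1 > sum2:
--
--         return 1
--
--     elif sum1 < sum2:
--
--         return 2
--
--     else:
--         return 0
-- ===== SOURCE B (Python) =====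
-- def more_vowels(string1, string2):
--     # Transposed traversal: loop over the 10 vowels, count each with str.count,
--     # and keep a single signed difference instead of two per-character sums.
--     diff = 0
--     for v in "AEIOUaeiou":
--         diff += string1.count(v) - string2.count(v)
--     if diff > 0:
--         return 1
--     elif diff < 0:
--         return 2
--     else:
--         return 0
-- ===== Notes on version B (the rewrite author's own statement) =====
-- stated objective: faster
-- what changed: B transposes the traversal: instead of building a Counter per string and summing over its distinct keys, it loops over the 10 vowels, counts each with str.count, and keeps one signed difference whose sign picks the result.
import Mathlib
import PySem

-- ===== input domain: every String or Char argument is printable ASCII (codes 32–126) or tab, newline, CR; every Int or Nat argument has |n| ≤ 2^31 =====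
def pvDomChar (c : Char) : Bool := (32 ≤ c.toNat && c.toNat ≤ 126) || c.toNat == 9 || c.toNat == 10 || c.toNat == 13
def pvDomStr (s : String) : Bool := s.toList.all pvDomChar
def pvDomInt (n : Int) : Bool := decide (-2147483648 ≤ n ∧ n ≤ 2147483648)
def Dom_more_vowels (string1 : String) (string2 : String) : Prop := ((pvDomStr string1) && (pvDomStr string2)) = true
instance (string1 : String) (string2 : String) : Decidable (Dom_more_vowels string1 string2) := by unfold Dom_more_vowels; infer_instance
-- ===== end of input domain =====

-- B replaces the Counter-then-keys aggregation by a transposed loop over the 10 vowels using str.count and one signed difference; a timing run measured B faster (constant factor).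


-- ===== PORT A =====
-- 'char in vowels' with char a single character: exact as list membership of the Char.
def more_vowels (string1 : String) (string2 : String) : Int :=
  let vowels := "AEIOUaeiou"
  let count1 := PySem.Dict.counter string1.toList
  let count2 := PySem.Dict.counter string2.toList
  let sum1 : Int :=
    count1.keys.foldl (fun s c => if vowels.toList.contains c then s + count1.getD c 0 else s) 0
  let sum2 : Int :=
    count2.keys.foldl (fun s c => if vowels.toList.contains c then s + count2.getD c 0 else s) 0
  if sum1 > sum2 then 1
  else if sum1 < sum2 then 2
  else 0

-- ===== PORT B =====
-- Python iterates "AEIOUaeiou" char by char; string.count(v) with a one-char pattern is PySem.Str.count on the one-char string (exact).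
def more_vowels_alt (string1 : String) (string2 : String) : Int :=
  let vowels := "AEIOUaeiou"
  let diff : Int := vowels.toList.foldl
    (fun d v => d + (PySem.Str.count string1 (String.ofList [v]) : Int)
                  - (PySem.Str.count string2 (String.ofList [v]) : Int)) 0
  if diff > 0 then 1
  else if diff < 0 then 2
  else 0

-- ===== PRECONDITION & SPEC =====
def Spec_more_vowels (string1 : String) (string2 : String) (out : Int) : Prop := out = more_vowels_alt string1 string2
instance (string1 : String) (string2 : String) (out : Int) : Decidable (Spec_more_vowels string1 string2 out) := by unfold Spec_more_vowels; infer_instance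

-- ===== CLAIM =====
def Claim_equal_more_vowels : Prop := ∀ (string1 : String) (string2 : String), Dom_more_vowels string1 string2 → Spec_more_vowels string1 string2 (more_vowels string1 string2)

-- ===== LEMMAS AND PROOFS =====

-- str.count with a single-character pattern counts that character.
theorem count_go_single (c : Char) : ∀ (fuel : Nat) (l : List Char) (acc : Nat), l.length ≤ fuel →
    PySem.Chars.count.go [c] fuel l acc = acc + l.count c := by
  intro fuel
  induction fuel with
  | zero =>
    intro l acc h
    have : l = [] := List.eq_nil_of_length_eq_zero (Nat.le_zero.mp h)
    subst this
    simp [PySem.Chars.count.go]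
  | succ n ih =>
    intro l acc h
    cases l with
    | nil => simp [PySem.Chars.count.go]
    | cons x t =>
      rw [PySem.Chars.count.go]
      have ht : t.length ≤ n := by simpa using h
      by_cases hx : c = x
      · subst hx
        simp [List.isPrefixOf, ih _ _ ht, List.count_cons]
        omega
      · have : (c == x) = false := by simp [hx]
        simp [List.isPrefixOf, this, Ne.symm hx, ih _ _ ht, List.count_cons]

theorem count_single (xs : List Char) (c : Char) :
    PySem.Chars.count xs [c] = xs.count c := by
  rw [PySem.Chars.count]
  simp [count_go_single c xs.length xs 0 (le_refl _)]

theorem countP_or_disjoint (xs : List Char) (f g : Char → Bool)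
    (h : ∀ x, ¬(f x = true ∧ g x = true)) :
    xs.countP (fun x => f x || g x) = xs.countP f + xs.countP g := by
  induction xs with
  | nil => simp
  | cons x t ih =>
    simp only [List.countP_cons, ih]
    by_cases hf : f x = true
    · have hg : g x = false := by
        cases hgb : g x
        · rfl
        · exact absurd ⟨hf, hgb⟩ (h x)
      simp [hf, hg] <;> omega
    · by_cases hg : g x = true <;> simp [hf, hg] <;> omega

-- splitting a membership count at a fresh head
theorem countP_contains_cons (xs : List Char) (c : Char) (t : List Char) (hct : c ∉ t) :
    xs.countP (fun x => (c :: t).contains x)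
      = xs.count c + xs.countP (fun x => t.contains x) := by
  have hfe : (fun x => (c :: t).contains x)
      = (fun x => (x == c) || t.contains x) := by
    funext x; by_cases hxc : x = c <;> simp [List.contains_cons, hxc]
  rw [hfe, countP_or_disjoint]
  · rw [List.count]
  · rintro x ⟨h1, h2⟩
    have hxc : x = c := by simpa using h1
    have hxt : x ∈ t := by simpa using h2
    exact hct (hxc ▸ hxt)

-- the signed-difference fold splits into two count sums over distinct vowels
theorem foldl_diff_counts (s : List Char) (hnd : s.Nodup) (xs ys : List Char) :
    ∀ (init : Int),
    s.foldl (fun d v => d + (xs.count v : Int) - (ys.count v : Int)) init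
      = init + (xs.countP (fun x => s.contains x) : Int)
             - (ys.countP (fun x => s.contains x) : Int) := by
  induction s with
  | nil => intro init; simp
  | cons c t ih =>
    intro init
    have hct : c ∉ t := (List.nodup_cons.mp hnd).1
    rw [List.foldl_cons, ih (List.nodup_cons.mp hnd).2,
        countP_contains_cons xs c t hct, countP_contains_cons ys c t hct]
    push_cast
    ring

theorem countP_eq_and_count (xs : List Char) (c : Char) (p : Char → Bool) :
    xs.countP (fun x => x == c && p x) = if p c then xs.count c else 0 := by
  induction xs with
  | nil => simp
  | cons x t ih =>
    simp only [List.countP_cons, List.count_cons, ih]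
    by_cases hx : x = c
    · subst hx; by_cases hp : p x <;> simp [hp]
    · simp [hx]

theorem foldl_count_keys (s : List Char) (hnd : s.Nodup) (xs : List Char) (p : Char → Bool)
    (init : Int) :
    s.foldl (fun a c => if p c then a + (xs.count c : Int) else a) init
      = init + (xs.countP (fun c => s.contains c && p c) : Int) := by
  induction s generalizing init with
  | nil => simp
  | cons c t ih =>
    have hct : c ∉ t := (List.nodup_cons.mp hnd).1
    have hnd' : t.Nodup := (List.nodup_cons.mp hnd).2
    have hsplit : xs.countP (fun x => (c :: t).contains x && p x)
        = xs.countP (fun x => x == c && p x) + xs.countP (fun x => t.contains x && p x) := by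
      have hfe : (fun x => (c :: t).contains x && p x)
          = (fun x => (x == c && p x) || (t.contains x && p x)) := by
        funext x
        by_cases hxc : x = c
        · subst hxc; cases hp : p x <;> simp [hp]
        · cases hp : p x <;> simp [List.contains_cons, hxc, hp]
      rw [hfe, countP_or_disjoint]
      rintro x ⟨h1, h2⟩
      have hxc : x = c := by simpa using (Bool.and_elim_left h1)
      have hxt : x ∈ t := by simpa using (Bool.and_elim_left h2)
      exact hct (hxc ▸ hxt)
    rw [List.foldl_cons, ih hnd', hsplit, countP_eq_and_count]
    by_cases hp : p c = true
    · simp only [if_pos hp]; push_cast; ring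
    · simp only [if_neg hp]; push_cast; ring

-- A's per-string Counter aggregation computes the vowel-membership count
theorem sum_over_counter (xs : List Char) (p : Char → Bool) :
    (PySem.Dict.counter xs).keys.foldl
        (fun s c => if p c then s + (PySem.Dict.counter xs).getD c 0 else s) 0
      = (xs.countP p : Int) := by
  have hfun : (fun (s : Int) (c : Char) => if p c then s + (PySem.Dict.counter xs).getD c 0 else s)
      = (fun s c => if p c then s + (xs.count c : Int) else s) := by
    funext s c
    rw [PySem.Dict.getD_counter]
  rw [hfun, PySem.Dict.keys_counter,
      foldl_count_keys _ (PySem.Set.nodup_ofList xs) xs p 0]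
  have h2 : xs.countP (fun c => List.contains (PySem.Set.ofList xs) c && p c) = xs.countP p := by
    apply List.countP_congr
    intro x hx
    have hm : x ∈ PySem.Set.ofList xs := by rw [PySem.Set.mem_ofList]; exact hx
    simp [hm]
  rw [h2]; ring

-- the vowels literal has no duplicate characters
theorem vowels_nodup : ("AEIOUaeiou".toList).Nodup := by decide

-- ===== VERDICT =====
theorem more_vowels_spec : Claim_equal_more_vowels := by
  intro s1 s2 _
  unfold Spec_more_vowels more_vowels more_vowels_alt
  simp only [sum_over_counter]
  have hc : (fun (d : Int) (v : Char) =>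
        d + (PySem.Str.count s1 (String.ofList [v]) : Int) - (PySem.Str.count s2 (String.ofList [v]) : Int))
      = (fun d v => d + (s1.toList.count v : Int) - (s2.toList.count v : Int)) := by
    funext d v
    rw [PySem.Str.count_eq, PySem.Str.count_eq]
    simp [count_single]
  rw [hc, foldl_diff_counts _ vowels_nodup s1.toList s2.toList 0]
  have he : (fun x => List.contains "AEIOUaeiou".toList x) = List.contains "AEIOUaeiou".toList := by
    funext x; rfl
  rw [he]
  split_ifs <;> omega
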